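-- pv_equiv track=rewrite | github.com/iron-bun/adventofcode | 2020/day20.py | enumerate_edges
-- ===== SOURCE A (Python) =====
-- def to_bin(word):
--   return "".join(["0" if c == "." else "1" for c in word])
--
-- def enumerate_edges(image):
--   edge1 = image[0]
--   edge2 = image[-1]
--   edge3 = "".join([line[0] for line in image])
--   edge4 = "".join([line[-1] for line in image])
--   edges = (edge1, edge2, edge3, edge4)
--
--   edges = list(map(to_bin, edges))
--   edges_forward = map(lambda x: int(x, 2), edges)
--   edges_backward = map(lambda x: int(x[::-1], 2), edges)
--
--   return (tuple(sorted([x, y])) for x, y in zip(edges_forward, edges_backward))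
-- ===== SOURCE B (Python) =====
-- def enumerate_edges(image):
--   def vals(chars):
--     fwd = bwd = 0
--     place = 1
--     for c in chars:
--       b = 0 if c == "." else 1
--       fwd = fwd * 2 + b
--       bwd += b * place
--       place *= 2
--     return (fwd, bwd) if fwd <= bwd else (bwd, fwd)
--   edges = (image[0], image[-1],
--            (line[0] for line in image), (line[-1] for line in image))
--   return (vals(e) for e in edges)
-- ===== Notes on version B (the rewrite author's own statement) =====
-- stated objective: simpler
-- what changed: Replaces the '0'/'1'-string builder plus two int(x,2) parses (one on a reversed copy) with a single per-edge pass that accumulates the forward value and the place-weighted backward value together, returning the ordered pair directly.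
import Mathlib
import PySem

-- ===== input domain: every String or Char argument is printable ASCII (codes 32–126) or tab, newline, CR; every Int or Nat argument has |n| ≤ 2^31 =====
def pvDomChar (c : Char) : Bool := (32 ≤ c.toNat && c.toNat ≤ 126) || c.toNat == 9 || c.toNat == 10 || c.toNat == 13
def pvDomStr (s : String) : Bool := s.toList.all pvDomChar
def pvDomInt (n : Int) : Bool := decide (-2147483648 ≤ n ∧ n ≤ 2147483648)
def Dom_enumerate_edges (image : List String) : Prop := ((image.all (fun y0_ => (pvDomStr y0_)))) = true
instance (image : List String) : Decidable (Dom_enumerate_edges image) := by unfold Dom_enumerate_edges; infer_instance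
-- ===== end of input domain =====

-- B replaces A's '0'/'1'-string building and two int(x,2) parses by a single per-edge pass
-- accumulating forward and place-weighted backward values together (objective: simpler).


-- ===== PORT A =====
-- to_bin(word): map '.'→'0', other→'1'  (over the characters)
def to_bin (word : List Char) : List Char :=
  word.map (fun c => if c == '.' then '0' else '1')

-- int(x, 2) on a string of '0'/'1' characters (exact on to_bin's output)
def parseBin (x : List Char) : Int :=
  x.foldl (fun a c => a * 2 + (if c == '1' then 1 else 0)) 0

def enumerate_edges (image : List String) : List (Int × Int) :=
  -- image[0], image[-1], line[0], line[-1] raise IndexError where pyGet? is none (excluded by Pre_)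
  match PySem.List.pyGet? image 0, PySem.List.pyGet? image (-1),
        image.mapM (fun line => PySem.Str.pyGet? line 0),
        image.mapM (fun line => PySem.Str.pyGet? line (-1)) with
  | some edge1, some edge2, some edge3, some edge4 =>
      let edges := [edge1.toList, edge2.toList, edge3, edge4]
      let edges := edges.map to_bin
      let edges_forward := edges.map (fun x => parseBin x)
      let edges_backward := edges.map (fun x => parseBin x.reverse)
      (edges_forward.zip edges_backward).map
        (fun p => if p.1 ≤ p.2 then (p.1, p.2) else (p.2, p.1))   -- tuple(sorted([x, y]))
  | _, _, _, _ => []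

-- ===== PORT B =====
-- vals(chars): one pass accumulating (fwd, bwd, place)
def edgeVals (chars : List Char) : Int × Int :=
  let r := chars.foldl
    (fun (s : Int × Int × Int) c =>
      let b : Int := if c == '.' then 0 else 1
      (s.1 * 2 + b, s.2.1 + b * s.2.2, s.2.2 * 2))
    (0, 0, 1)
  if r.1 ≤ r.2.1 then (r.1, r.2.1) else (r.2.1, r.1)

def enumerate_edges_alt (image : List String) : List (Int × Int) :=
  match PySem.List.pyGet? image 0 with
  | none => []
  | some e1 =>
    match PySem.List.pyGet? image (-1) with
    | none => []
    | some e2 =>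
      match image.mapM (fun line => PySem.Str.pyGet? line 0) with
      | none => []
      | some c3 =>
        match image.mapM (fun line => PySem.Str.pyGet? line (-1)) with
        | none => []
        | some c4 => [edgeVals e1.toList, edgeVals e2.toList, edgeVals c3, edgeVals c4]

-- ===== PRECONDITION & SPEC =====
-- A raises IndexError on an empty image (image[0]) and on any empty line (line[0]/line[-1]);
-- Pre_ excludes exactly those inputs.
def Pre_enumerate_edges (image : List String) : Prop :=
  image ≠ [] ∧ ∀ line ∈ image, line ≠ ""
instance (image : List String) : Decidable (Pre_enumerate_edges image) := by
  unfold Pre_enumerate_edges; infer_instance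
def pvWitness_enumerate_edges : List String := ["#.", ".#"]

def Spec_enumerate_edges (image : List String) (out : List (Int × Int)) : Prop := out = enumerate_edges_alt image
instance (image : List String) (out : List (Int × Int)) : Decidable (Spec_enumerate_edges image out) := by unfold Spec_enumerate_edges; infer_instance

-- ===== CLAIM (what is proved, stated in full; the proofs are below) =====
def Claim_equal_enumerate_edges : Prop := ∀ (image : List String), Dom_enumerate_edges image → Pre_enumerate_edges image → Spec_enumerate_edges image (enumerate_edges image)

-- ===== LEMMAS AND PROOFS =====

-- forward value: parsing to_bin's output is the single-pass forward accumulation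
theorem parse_to_bin (l : List Char) (a : Int) :
    (to_bin l).foldl (fun a c => a * 2 + (if c == '1' then 1 else 0)) a
      = l.foldl (fun a c => a * 2 + (if c == '.' then 0 else 1)) a := by
  induction l generalizing a with
  | nil => rfl
  | cons c t ih =>
      by_cases h : c = '.' <;> simp only [to_bin, List.map, List.foldl, h] <;>
        simpa [to_bin] using ih _

-- backward value: cons prepends the most significant bit of the reversed parse
theorem parse_rev_cons (c : Char) (t : List Char) :
    parseBin (to_bin (c :: t)).reverse
      = 2 * parseBin (to_bin t).reverse + (if c == '.' then 0 else 1) := by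
  simp only [to_bin, List.map, List.reverse_cons, parseBin, List.foldl_append, List.foldl]
  by_cases h : c = '.' <;> simp [h, mul_comm]

-- the fold of edgeVals computes (forward, s + p * backward, p * 2^len)
theorem edge_fold (l : List Char) (a s p : Int) :
    l.foldl
      (fun (st : Int × Int × Int) c =>
        let b : Int := if c == '.' then 0 else 1
        (st.1 * 2 + b, st.2.1 + b * st.2.2, st.2.2 * 2)) (a, s, p)
      = (l.foldl (fun a c => a * 2 + (if c == '.' then 0 else 1)) a,
         s + p * parseBin (to_bin l).reverse,
         p * 2 ^ l.length) := by
  induction l generalizing a s p with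
  | nil => simp [to_bin, parseBin]
  | cons c t ih =>
      simp only [List.foldl, List.length_cons, parse_rev_cons, ih]
      refine Prod.ext rfl (Prod.ext ?_ ?_)
      · simp only [beq_iff_eq]; split_ifs <;> ring
      · simp only []; ring

-- per-edge agreement
theorem edge_eq (l : List Char) :
    (if parseBin (to_bin l) ≤ parseBin (to_bin l).reverse
       then (parseBin (to_bin l), parseBin (to_bin l).reverse)
       else (parseBin (to_bin l).reverse, parseBin (to_bin l)))
      = edgeVals l := by
  simp only [edgeVals, edge_fold, parseBin, parse_to_bin, zero_add, one_mul]

-- ===== VERDICT (by name: the statement is the Claim_ definition above) =====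
theorem enumerate_edges_spec : Claim_equal_enumerate_edges := by
  intro image _ _
  unfold Spec_enumerate_edges enumerate_edges enumerate_edges_alt
  cases h1 : PySem.List.pyGet? image 0 <;>
  cases h2 : PySem.List.pyGet? image (-1) <;>
  cases h3 : image.mapM (fun line => PySem.Str.pyGet? line 0) <;>
  cases h4 : image.mapM (fun line => PySem.Str.pyGet? line (-1)) <;>
    simp only []
  case some.some.some.some e1 e2 c3 c4 =>
    simp only [List.map, List.zip, List.zipWith, List.map_cons]
    simp only [← edge_eq]
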